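-- pv_equiv track=rewrite | github.com/hhursev/recipe-scrapers | generate.py | get_line_offsets
-- ===== SOURCE A (Python) =====
-- def get_line_offsets(code):
--     offset = 0
--     indices = [0]
--     try:
--         while True:
--             index = code.index("\n", offset)
--             indices.append(index)
--             offset = index + 1
--     except ValueError:
--         return indices
-- ===== SOURCE B (Python) =====
-- def get_line_offsets(code):
--     indices = [0]
--     pos = 0
--     for part in code.split("\n")[:-1]:
--         pos += len(part)
--         indices.append(pos)
--         pos += 1
--     return indices
-- ===== Notes on version B (the rewrite author's own statement) =====
-- stated objective: alternative
-- what changed: B first splits the string on newlines and then reconstructs the newline offsets from the lengths of the parts by a running prefix sum, instead of A's exception-terminated while-loop of repeated str.index jumps.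
import Mathlib
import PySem

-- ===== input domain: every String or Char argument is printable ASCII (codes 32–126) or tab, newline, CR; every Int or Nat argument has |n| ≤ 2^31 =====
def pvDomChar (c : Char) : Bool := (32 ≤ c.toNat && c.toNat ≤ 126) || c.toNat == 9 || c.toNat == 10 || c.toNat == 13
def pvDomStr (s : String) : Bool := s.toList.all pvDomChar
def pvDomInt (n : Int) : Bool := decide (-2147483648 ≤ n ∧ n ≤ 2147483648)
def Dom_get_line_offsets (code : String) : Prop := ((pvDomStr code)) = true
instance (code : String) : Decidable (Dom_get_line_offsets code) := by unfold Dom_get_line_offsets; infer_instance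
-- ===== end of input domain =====

-- B splits the string on "\n" first and reconstructs the newline offsets from the
-- lengths of the parts by a running prefix sum, instead of A's exception-terminated
-- while-loop of repeated str.index jumps (objective: alternative).

-- ===== PORT A =====
-- A's `while True: index = code.index("\n", offset) …` loop; the fuel argument only
-- makes the recursion total (code.length+1 iterations always suffice), the step is
-- exactly A's body: findFrom = str.index-with-start, stop when it raises (-1).
def pvGoA (cs : List Char) : Nat → Nat → List Int → List Int
  | 0, _, acc => acc
  | fuel + 1, offset, acc =>
    let i := PySem.Chars.findFrom cs ['\n'] (offset : Int) none
    if i = -1 then acc else pvGoA cs fuel (i.toNat + 1) (acc ++ [i])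

def get_line_offsets (code : String) : List Int :=
  pvGoA code.toList (code.toList.length + 1) 0 [0]

-- ===== PORT B =====
-- Source B: parts = code.split("\n"); loop over parts[:-1] keeping (pos, indices).
def get_line_offsets_alt (code : String) : List Int :=
  let parts := PySem.Chars.splitOn code.toList ['\n']
  ((PySem.List.slice parts none (some (-1))).foldl
    (fun (st : Int × List Int) part =>
      (st.1 + part.length + 1, st.2 ++ [st.1 + part.length])) ((0 : Int), [(0 : Int)])).2

-- ===== PRECONDITION & SPEC =====
def Spec_get_line_offsets (code : String) (out : List Int) : Prop := out = get_line_offsets_alt code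
instance (code : String) (out : List Int) : Decidable (Spec_get_line_offsets code out) := by unfold Spec_get_line_offsets; infer_instance

-- ===== CLAIM (what is proved, stated in full; the proofs are below) =====
def Claim_equal_get_line_offsets : Prop := ∀ (code : String), Dom_get_line_offsets code → Spec_get_line_offsets code (get_line_offsets code)

-- ===== LEMMAS AND PROOFS =====

-- newline positions of cs, indices counted from k (proof-side characterisation)
def pvNl : List Char → Nat → List Nat
  | [], _ => []
  | c :: cs, k => if c = '\n' then k :: pvNl cs (k + 1) else pvNl cs (k + 1)

theorem pvNl_eq_nil {cs : List Char} (h : '\n' ∉ cs) (k : Nat) : pvNl cs k = [] := by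
  induction cs generalizing k with
  | nil => rfl
  | cons c cs ih =>
    simp only [List.mem_cons, not_or] at h
    simp only [pvNl]
    rw [if_neg (fun hc => h.1 hc.symm)]
    exact ih h.2 _

theorem pvNl_skip {cs : List Char} {t : Nat} (h : '\n' ∉ cs.take t) (k : Nat) :
    pvNl cs k = pvNl (cs.drop t) (k + t) := by
  induction t generalizing cs k with
  | zero => simp
  | succ t ih =>
    cases cs with
    | nil => simp [pvNl]
    | cons c cs =>
      simp only [List.take_succ_cons, List.mem_cons, not_or] at h
      simp only [pvNl, List.drop_succ_cons]
      rw [if_neg (fun hc => h.1 hc.symm), ih h.2 (k + 1)]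
      congr 1
      omega

-- singleton-prefix of a drop = the character at that index
theorem pvPrefix_iff (cs : List Char) (m : Nat) :
    ['\n'] <+: cs.drop m ↔ cs[m]? = some '\n' := by
  constructor
  · rintro ⟨t, ht⟩
    have h0 : (cs.drop m)[0]? = some '\n' := by rw [← ht]; rfl
    simpa [List.getElem?_drop] using h0
  · intro h
    have hm : m < cs.length := by
      by_contra hm
      simp [List.getElem?_eq_none (show cs.length ≤ m by omega)] at h
    refine ⟨cs.drop (m + 1), ?_⟩
    have hd : cs.drop m = cs[m] :: cs.drop (m + 1) := List.drop_eq_getElem_cons hm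
    have hc : cs[m] = '\n' := by
      have hg := List.getElem?_eq_getElem hm
      rw [hg] at h; exact Option.some.inj h
    rw [hd, hc]
    rfl

-- main invariant of A's loop
theorem pvGoA_inv (cs : List Char) (fuel offset : Nat) (acc : List Int)
    (hoff : offset ≤ cs.length) (hfuel : cs.length + 1 ≤ fuel + offset) :
    pvGoA cs fuel offset acc = acc ++ (pvNl (cs.drop offset) offset).map Int.ofNat := by
  induction fuel generalizing offset acc with
  | zero => omega
  | succ fuel ih =>
    simp only [pvGoA]
    by_cases hi : PySem.Chars.findFrom cs ['\n'] (offset : Int) none = -1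
    · rw [if_pos hi]
      rw [PySem.Chars.findFrom_natCast_eq_neg_one_iff cs ['\n'] offset hoff] at hi
      have hmem : '\n' ∉ cs.drop offset := by
        intro hm
        obtain ⟨s, t, hst⟩ := List.mem_iff_append.mp hm
        exact hi ⟨s, t, by rw [hst]; simp⟩
      rw [pvNl_eq_nil hmem, List.map_nil, List.append_nil]
    · rw [if_neg hi]
      obtain ⟨h1, h2, h3⟩ := PySem.Chars.findFrom_natCast_spec cs ['\n'] offset hoff hi
      set i := PySem.Chars.findFrom cs ['\n'] (offset : Int) none with hidef
      have hi0 : 0 ≤ i := le_trans (Int.natCast_nonneg offset) h1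
      have hgot : cs[i.toNat]? = some '\n' := (pvPrefix_iff cs i.toNat).mp h2
      have hlt : i.toNat < cs.length := by
        by_contra hcon
        simp [List.getElem?_eq_none (show cs.length ≤ i.toNat by omega)] at hgot
      have hoi : offset ≤ i.toNat := by omega
      have hskip : '\n' ∉ (cs.drop offset).take (i.toNat - offset) := by
        intro hm
        obtain ⟨j, hj, hcj⟩ := List.getElem_of_mem hm
        have hj2 := hj
        simp only [List.length_take, List.length_drop, Nat.lt_min] at hj2
        have hjd : j < (cs.drop offset).length := by simp only [List.length_drop]; omega
        rw [List.getElem_take] at hcj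
        have hq : (cs.drop offset)[j]? = some '\n' := by
          rw [List.getElem?_eq_getElem hjd, hcj]
        have hcs : cs[offset + j]? = some '\n' := by
          rw [← List.getElem?_drop]; exact hq
        exact h3 (offset + j) (by omega) (by omega) ((pvPrefix_iff cs (offset + j)).mpr hcs)
      rw [pvNl_skip hskip offset, List.drop_drop, Nat.add_sub_cancel' hoi]
      have hc : cs[i.toNat]'hlt = '\n' := by
        have hg := List.getElem?_eq_getElem hlt
        rw [hg] at hgot; exact Option.some.inj hgot
      have hdropi : cs.drop i.toNat = '\n' :: cs.drop (i.toNat + 1) := by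
        rw [List.drop_eq_getElem_cons hlt, hc]
      rw [hdropi]
      rw [ih (i.toNat + 1) (acc ++ [i]) (by omega) (by omega)]
      simp [pvNl, Int.toNat_of_nonneg hi0]

-- proof-side characterisation of split("\n"): pre = current part read so far
def pvParts (pre : List Char) : List Char → List (List Char)
  | [] => [pre]
  | c :: cs => if c = '\n' then pre :: pvParts [] cs else pvParts (pre ++ [c]) cs

theorem pvParts_ne_nil (pre cs : List Char) : pvParts pre cs ≠ [] := by
  induction cs generalizing pre with
  | nil => simp [pvParts]
  | cons c cs ih =>
    simp only [pvParts]
    split_ifs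
    · simp
    · exact ih _

theorem pvSplitOn_go_eq (fuel : Nat) (l cur : List Char) (acc : List (List Char))
    (h : l.length < fuel) :
    PySem.Chars.splitOn.go ['\n'] fuel l cur acc = acc.reverse ++ pvParts cur.reverse l := by
  induction fuel generalizing l cur acc with
  | zero => omega
  | succ fuel ih =>
    cases l with
    | nil => simp [PySem.Chars.splitOn.go, pvParts]
    | cons c rest =>
      simp only [PySem.Chars.splitOn.go]
      by_cases hc : c = '\n'
      · rw [if_pos (by simp [hc, List.isPrefixOf])]
        simp only [List.length_cons] at h
        simp only [List.length_singleton, List.drop_succ_cons, List.drop_zero]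
        rw [ih rest [] (cur.reverse :: acc) (by omega)]
        simp [pvParts, hc]
      · rw [if_neg (by simp [List.isPrefixOf]; exact fun h' => hc h'.symm)]
        simp only [List.length_cons] at h
        rw [ih rest (c :: cur) acc (by omega)]
        simp [pvParts, hc]

theorem pvSplitOn_eq (cs : List Char) :
    PySem.Chars.splitOn cs ['\n'] = pvParts [] cs := by
  unfold PySem.Chars.splitOn
  rw [pvSplitOn_go_eq (cs.length + 1) cs [] [] (by omega)]
  rfl

-- B's fold over parts[:-1] computes the newline positions
theorem pvFold_inv (cs pre : List Char) (k : Nat) (acc : List Int) :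
    (((pvParts pre cs).dropLast).foldl
      (fun (st : Int × List Int) part =>
        (st.1 + part.length + 1, st.2 ++ [st.1 + part.length])) ((k : Int), acc)).2
      = acc ++ (pvNl cs (k + pre.length)).map Int.ofNat := by
  induction cs generalizing pre k acc with
  | nil => simp [pvParts, pvNl]
  | cons c cs ih =>
    by_cases hc : c = '\n'
    · have hne := pvParts_ne_nil ([] : List Char) cs
      simp only [pvParts, if_pos hc]
      rw [List.dropLast_cons_of_ne_nil hne, List.foldl_cons]
      have hcast : ((k : Int) + pre.length + 1) = (((k + pre.length + 1 : Nat)) : Int) := by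
        push_cast; ring
      rw [hcast, ih [] (k + pre.length + 1) (acc ++ [(k : Int) + pre.length])]
      simp [pvNl, hc]
    · simp only [pvParts, if_neg hc]
      rw [ih (pre ++ [c]) k acc]
      simp [pvNl, hc]
      ring_nf

-- ===== VERDICT (by name: the statement is the Claim_ definition above) =====
theorem get_line_offsets_spec : Claim_equal_get_line_offsets := by
  intro code _
  unfold Spec_get_line_offsets get_line_offsets get_line_offsets_alt
  rw [pvGoA_inv code.toList (code.toList.length + 1) 0 [0] (by omega) (by omega)]
  simp only [pvSplitOn_eq]
  have hslice : PySem.List.slice (pvParts [] code.toList) none (some (-1))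
      = (pvParts [] code.toList).dropLast := by
    simp [PySem.List.slice, List.dropLast_eq_take]
  rw [hslice]
  have := pvFold_inv code.toList [] 0 [0]
  simpa using this.symm
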